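-- pv_equiv track=rewrite | github.com/Adiiity/Leetcode-Daily-Practice | 3876-transform-array-to-all-equal-elements/3876-transform-array-to-all-equal-elements.py | canMakeEqual
-- ===== SOURCE A (Python) =====
-- from typing import List
--
-- def canMakeEqual(nums: List[int], k: int) -> bool:
--
--     def possible(x):
--         num_copy=nums.copy()
--         op=0
--         for i in range(len(nums)-1):
--             if num_copy[i]!=x:
--                 num_copy[i]*= -1
--                 num_copy[i+1]*= -1
--                 op+=1
--                 if op>k:
--                     return False
--         return num_copy.count(x)==len(nums)
--
--     return possible(1) or possible(-1)
-- ===== SOURCE B (Python) =====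
-- def canMakeEqual(nums, k):
--     # An element can only ever become 1 or -1 by sign flips, and for a target x
--     # the i-th element must be flipped exactly when an odd number of the values
--     # before-and-including it equal -x.  So the operation count for target x is
--     # the sum of gap lengths between consecutive pairs of positions holding -x,
--     # and it is achievable only when that position list has even length.
--     ones, negs = [], []
--     for i, v in enumerate(nums):
--         if v == 1:
--             ones.append(i)
--         elif v == -1:
--             negs.append(i)
--         else:
--             return False
--     def cost(pos):
--         if len(pos) % 2:
--             return None
--         return sum(pos[j + 1] - pos[j] for j in range(0, len(pos), 2))
--     c1 = cost(negs)
--     c2 = cost(ones)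
--     return (c1 is not None and c1 <= k) or (c2 is not None and c2 <= k)
-- ===== Notes on version B (the rewrite author's own statement) =====
-- stated objective: faster
-- what changed: Replaces the greedy mutated-copy simulation (copy, in-place flips and a final count pass, run once per target) with a closed-form computation: one pass collects the positions of 1s and of -1s, and for each target the operation count is the sum of index gaps over consecutive pairs of wrong-value positions (feasible only when that list has even length); no copies, no mutation, no count pass.
-- intended difference: For k < 0 with nums empty or already all 1s (or all -1s), A returns True because its op>k check only runs after an increment, while B returns False since even zero operations do not fit a negative budget; B's reading of 'at most k operations' is the intended one for a negative k. — e.g. on canMakeEqual([1], -1): A returns true, B returns false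
import Mathlib
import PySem

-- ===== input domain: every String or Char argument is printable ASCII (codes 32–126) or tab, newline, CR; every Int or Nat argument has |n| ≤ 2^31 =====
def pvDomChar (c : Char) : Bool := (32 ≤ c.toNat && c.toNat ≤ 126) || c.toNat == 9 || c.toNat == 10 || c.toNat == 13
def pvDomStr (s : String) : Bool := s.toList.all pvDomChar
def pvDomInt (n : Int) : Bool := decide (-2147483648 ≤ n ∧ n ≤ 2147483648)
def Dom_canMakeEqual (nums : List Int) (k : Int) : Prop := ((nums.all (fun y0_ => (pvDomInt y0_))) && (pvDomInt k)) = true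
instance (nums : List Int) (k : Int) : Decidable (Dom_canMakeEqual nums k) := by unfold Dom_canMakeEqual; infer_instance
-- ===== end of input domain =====

-- B replaces A's greedy mutated-copy simulation by a closed-form computation:
-- collect positions of 1s and -1s once, then for each target sum the gaps of
-- consecutive pairs of wrong-value positions (alternative algorithm).

-- ===== PORT A =====
-- the for-loop of possible(x): iterates over the index list, mutating the copy;
-- indices produced by range(len(nums)-1) are always in range, so getD is exact here
def aLoop (x k : Int) : List Nat → List Int → Int → Option (List Int)
  | [], copy, _ => some copy
  | i :: idxs, copy, op =>
    let v := copy.getD i 0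
    if v ≠ x then
      let c1 := copy.set i (-v)
      let c2 := c1.set (i+1) (-(c1.getD (i+1) 0))
      if op + 1 > k then none
      else aLoop x k idxs c2 (op + 1)
    else aLoop x k idxs copy op

def possibleA (nums : List Int) (k x : Int) : Bool :=
  match aLoop x k (List.range (nums.length - 1)) nums 0 with
  | none => false
  | some c => decide (c.count x = nums.length)

def canMakeEqual (nums : List Int) (k : Int) : Bool :=
  possibleA nums k 1 || possibleA nums k (-1)

-- ===== PORT B =====
-- the collect loop of Source B: walks enumerate(nums), appending each index to the
-- ones / negs list, early-returning None (failure) on any other value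
def bCollect : List (Int × Int) → List Int → List Int → Option (List Int × List Int)
  | [], ones, negs => some (ones, negs)
  | (i, v) :: rest, ones, negs =>
    if v = 1 then bCollect rest (ones ++ [i]) negs
    else if v = -1 then bCollect rest ones (negs ++ [i])
    else none

-- cost(pos) of Source B: None on odd length, else the sum of pos[j+1]-pos[j] over pairs
def bPairCost : List Int → Option Int
  | [] => some 0
  | [_] => none
  | a :: b :: r => (bPairCost r).map (fun c => (b - a) + c)

def canMakeEqual_alt (nums : List Int) (k : Int) : Bool :=
  match bCollect (PySem.List.enumerate nums 0) [] [] with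
  | none => false
  | some (ones, negs) =>
    (match bPairCost negs with | none => false | some c => decide (c ≤ k)) ||
    (match bPairCost ones with | none => false | some c => decide (c ≤ k))

-- ===== PRECONDITION & SPEC =====
-- For k < 0 with nums empty or already all 1s (or all -1s), A returns True because
-- its op>k check only runs after an increment, while B returns False since even zero
-- operations do not fit a negative budget; B's reading is the intended one.
def D_canMakeEqual (nums : List Int) (k : Int) : Prop :=
  k < 0 ∧ ((nums.all fun v => decide (v = 1)) = true ∨ (nums.all fun v => decide (v = -1)) = true)
instance (nums : List Int) (k : Int) : Decidable (D_canMakeEqual nums k) := by unfold D_canMakeEqual; infer_instance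

def Spec_canMakeEqual (nums : List Int) (k : Int) (out : Bool) : Prop := ¬ D_canMakeEqual nums k → out = canMakeEqual_alt nums k
instance (nums : List Int) (k : Int) (out : Bool) : Decidable (Spec_canMakeEqual nums k out) := by unfold Spec_canMakeEqual; infer_instance

def pvDiffWitness_canMakeEqual : List Int × Int := ([1], -1)
def pvDiffWitnessOut_canMakeEqual : Bool × Bool := (true, false)

-- ===== CLAIM (what is proved, stated in full; the proofs are below) =====
def Claim_unchanged_canMakeEqual : Prop := ∀ (nums : List Int) (k : Int), Dom_canMakeEqual nums k → Spec_canMakeEqual nums k (canMakeEqual nums k)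
def Claim_changed_canMakeEqual : Prop := Dom_canMakeEqual (pvDiffWitness_canMakeEqual.1) (pvDiffWitness_canMakeEqual.2) ∧ D_canMakeEqual (pvDiffWitness_canMakeEqual.1) (pvDiffWitness_canMakeEqual.2) ∧ canMakeEqual (pvDiffWitness_canMakeEqual.1) (pvDiffWitness_canMakeEqual.2) = pvDiffWitnessOut_canMakeEqual.1 ∧ canMakeEqual_alt (pvDiffWitness_canMakeEqual.1) (pvDiffWitness_canMakeEqual.2) = pvDiffWitnessOut_canMakeEqual.2 ∧ pvDiffWitnessOut_canMakeEqual.1 ≠ pvDiffWitnessOut_canMakeEqual.2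
def Claim_exact_canMakeEqual : Prop := ∀ (nums : List Int) (k : Int), Dom_canMakeEqual nums k → D_canMakeEqual nums k → canMakeEqual nums k ≠ canMakeEqual_alt nums k

-- ===== LEMMAS AND PROOFS =====

-- streaming abstraction used only by the proofs: parity flag + op counter
def bStep (x : Int) (s : Bool × Int) (v : Int) : Bool × Int :=
  let acc := xor s.1 (decide (v = -x))
  (acc, s.2 + if acc then 1 else 0)

def okB (nums : List Int) (k x : Int) : Bool :=
  match nums with
  | [] => true
  | w :: ws =>
    if (w :: ws).any (fun v => decide (v ≠ x) && decide (v ≠ -x)) then false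
    else
      let s := (w :: ws).dropLast.foldl (bStep x) (false, (0 : Int))
      (decide (s.2 ≤ k) || decide (s.2 = 0)) && !(xor s.1 (decide ((w :: ws).getLastD 0 = -x)))

-- boolean abstraction of A's loop result (proof helper)
def sem (x k : Int) : Int → Int → List Int → Bool
  | _, cur, [] => decide (cur = x)
  | op, cur, v :: rest =>
    if cur = x then sem x k op v rest
    else if op + 1 > k then false
    else decide (-cur = x) && sem x k (op + 1) (-v) rest

lemma getD_append_cons (done : List Int) (cur : Int) (rest : List Int) :
    (done ++ cur :: rest).getD done.length 0 = cur := by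
  induction done with
  | nil => rfl
  | cons a t ih => simp [List.getD, ih]

lemma set_append_cons (done : List Int) (cur a : Int) (rest : List Int) :
    (done ++ cur :: rest).set done.length a = done ++ a :: rest := by
  induction done with
  | nil => rfl
  | cons b t ih => simp [ih]

lemma count_full_append (done : List Int) (x a : Int) :
    decide ((done ++ [a]).count x = (done ++ [a]).length)
      = (decide (done.count x = done.length) && decide (a = x)) := by
  have h : done.count x ≤ done.length := List.count_le_length
  by_cases hax : a = x
  · have h1 : (done ++ [a]).count x = done.count x + 1 := by simp [hax]
    rw [h1, decide_eq_true hax, Bool.and_true]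
    simp only [List.length_append, List.length_cons, List.length_nil, decide_eq_decide]
    omega
  · have h1 : (done ++ [a]).count x = done.count x := by simp [hax]
    rw [h1, decide_eq_false hax, Bool.and_false]
    simp only [List.length_append, List.length_cons, List.length_nil,
      decide_eq_false_iff_not]
    omega

lemma aLoop_eq_sem (x k : Int) :
    ∀ (rest done : List Int) (cur op : Int),
      (match aLoop x k (List.range' done.length rest.length) (done ++ cur :: rest) op with
       | none => false
       | some c => decide (c.count x = (done ++ cur :: rest).length))
      = (decide (done.count x = done.length) && sem x k op cur rest) := by
  intro rest
  induction rest with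
  | nil =>
    intro done cur op
    simp only [List.length_nil, List.range'_zero, aLoop, sem]
    exact count_full_append done x cur
  | cons v rest' ih =>
    intro done cur op
    have hget : (done ++ cur :: v :: rest').getD done.length 0 = cur :=
      getD_append_cons done cur (v :: rest')
    have hset1 : (done ++ cur :: v :: rest').set done.length (-cur)
        = (done ++ [-cur]) ++ v :: rest' := by
      rw [set_append_cons done cur (-cur) (v :: rest')]; simp
    have hget2 : ((done ++ [-cur]) ++ v :: rest').getD (done.length + 1) 0 = v := by
      have h := getD_append_cons (done ++ [-cur]) v rest'
      simp only [List.length_append, List.length_cons, List.length_nil] at h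
      exact h
    have hset2 : (((done ++ [-cur]) ++ v :: rest').set (done.length + 1) (-v))
        = (done ++ [-cur]) ++ (-v) :: rest' := by
      have h := set_append_cons (done ++ [-cur]) v (-v) rest'
      simp only [List.length_append, List.length_cons, List.length_nil] at h
      exact h
    simp only [List.length_cons, List.range'_succ, aLoop, hget, hset1, hget2, hset2]
    by_cases hc : cur = x
    · rw [if_neg (by simp [hc])]
      have h1 : done ++ cur :: v :: rest' = (done ++ [cur]) ++ v :: rest' := by simp
      have h2 : done.length + 1 = (done ++ [cur]).length := by simp
      simp only [h1, h2]
      rw [ih (done ++ [cur]) v op, count_full_append done x cur]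
      simp [sem, hc]
    · rw [if_pos (by simpa using hc)]
      by_cases hk : op + 1 > k
      · simp only [if_pos hk]
        simp [sem, hc, hk]
      · rw [if_neg hk]
        have hlen : (done ++ cur :: v :: rest').length
            = ((done ++ [-cur]) ++ (-v) :: rest').length := by simp
        have h2 : done.length + 1 = (done ++ [-cur]).length := by simp
        simp only [hlen, h2]
        rw [ih (done ++ [-cur]) (-v) (op + 1), count_full_append done x (-cur)]
        simp only [sem, if_neg hc, if_neg hk, Bool.and_assoc]

lemma fold_ops_mono (x : Int) :
    ∀ (l : List Int) (a : Bool) (o : Int), o ≤ (l.foldl (bStep x) (a, o)).2 := by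
  intro l
  induction l with
  | nil => intro a o; simp
  | cons v t ih =>
    intro a o
    simp only [List.foldl]
    exact le_trans (show o ≤ (bStep x (a, o) v).2 by
        simp only [bStep]; split <;> omega)
      (ih (bStep x (a, o) v).1 (bStep x (a, o) v).2)

lemma sem_eq_b (x k : Int) (hx : x ≠ -x) :
    ∀ (ws : List Int) (w : Int) (acc : Bool) (op : Int),
      sem x k op (if acc then -w else w) ws =
        (if (w :: ws).any (fun v => decide (v ≠ x) && decide (v ≠ -x)) then false
         else
           let s := (w :: ws).dropLast.foldl (bStep x) (acc, op)
           (decide (s.2 ≤ k) || decide (s.2 = op)) && !(xor s.1 (decide ((w :: ws).getLastD 0 = -x)))) := by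
  intro ws
  induction ws with
  | nil =>
    intro w acc op
    simp only [List.any_cons, List.any_nil, Bool.or_false, List.dropLast_singleton,
      List.foldl_nil, List.getLastD_cons, List.getLastD_nil, sem]
    cases acc <;> by_cases h1 : w = x <;> by_cases h2 : w = -x <;>
      simp_all <;> omega
  | cons u ws' ihw =>
    intro w acc op
    by_cases hbw : w ≠ x ∧ w ≠ -x
    · have he : (if acc then -w else w) ≠ x := by
        have h1 := hbw.1; have h2 := hbw.2; cases acc <;> simp <;> omega
      have hne : (-if acc then -w else w) ≠ x := by
        have h1 := hbw.1; have h2 := hbw.2; cases acc <;> simp <;> omega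
      have hany : ((w :: u :: ws').any fun v => decide (v ≠ x) && decide (v ≠ -x)) = true := by
        simp only [List.any_cons, Bool.or_eq_true, Bool.and_eq_true, decide_eq_true_eq]
        exact Or.inl ⟨hbw.1, hbw.2⟩
      rw [if_pos hany]
      simp only [sem, if_neg he]
      by_cases hk : op + 1 > k
      · rw [if_pos hk]
      · rw [if_neg hk, decide_eq_false hne, Bool.false_and]
    · have hw : w = x ∨ w = -x := by tauto
      have hfw : (decide (w ≠ x) && decide (w ≠ -x)) = false := by
        rcases hw with h | h <;> simp [h]
      by_cases he : (if acc then -w else w) = x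
      · have hacc' : xor acc (decide (w = -x)) = false := by
          cases acc <;> simp_all <;> omega
        have IH := ihw u false op
        rw [if_neg Bool.false_ne_true] at IH
        simp only [sem, if_pos he]
        rw [IH]
        simp only [List.any_cons, hfw, Bool.false_or, List.dropLast_cons₂,
          List.foldl_cons, List.getLastD_cons]
        have hstep : bStep x (acc, op) w = (false, op) := by
          simp [bStep, hacc']
        simp only [hstep]
      · have hb : xor acc (decide (w = -x)) = true := by
          rcases hw with h | h <;> cases acc <;> simp_all <;> omega
        have hmex : (-if acc then -w else w) = x := by
          rcases hw with h | h <;> cases acc <;> simp_all <;> omega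
        have hstep : bStep x (acc, op) w = (true, op + 1) := by
          simp [bStep, hb]
        simp only [sem, if_neg he]
        by_cases hk : op + 1 > k
        · rw [if_pos hk]
          by_cases hany : ((u :: ws').any fun v => decide (v ≠ x) && decide (v ≠ -x)) = true
          · have houter : ((w :: u :: ws').any fun v => decide (v ≠ x) && decide (v ≠ -x)) = true := by
              simp only [List.any_cons, hany, Bool.or_true]
            rw [if_pos houter]
          · have hany' : ((u :: ws').any fun v => decide (v ≠ x) && decide (v ≠ -x)) = false := by
              revert hany; cases (u :: ws').any fun v => decide (v ≠ x) && decide (v ≠ -x) <;> simp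
            have houter : ((w :: u :: ws').any fun v => decide (v ≠ x) && decide (v ≠ -x)) = false := by
              simp only [List.any_cons, hany', hfw, Bool.or_false]
            rw [if_neg (by rw [houter]; exact Bool.false_ne_true)]
            have hmono := fold_ops_mono x ((u :: ws').dropLast) true (op + 1)
            simp only [List.dropLast_cons₂, List.foldl_cons, hstep]
            have hg1 : decide (((u :: ws').dropLast.foldl (bStep x) (true, op + 1)).2 ≤ k)
                = false := by simp only [decide_eq_false_iff_not]; omega
            have hg2 : decide (((u :: ws').dropLast.foldl (bStep x) (true, op + 1)).2 = op)
                = false := by simp only [decide_eq_false_iff_not]; omega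
            simp [hg1, hg2]
        · rw [if_neg hk]
          have IH := ihw u true (op + 1)
          rw [if_pos rfl] at IH
          rw [IH, decide_eq_true hmex, Bool.true_and]
          by_cases hany : ((u :: ws').any fun v => decide (v ≠ x) && decide (v ≠ -x)) = true
          · have houter : ((w :: u :: ws').any fun v => decide (v ≠ x) && decide (v ≠ -x)) = true := by
              simp only [List.any_cons, hany, Bool.or_true]
            rw [if_pos hany, if_pos houter]
          · have hany' : ((u :: ws').any fun v => decide (v ≠ x) && decide (v ≠ -x)) = false := by
              revert hany; cases (u :: ws').any fun v => decide (v ≠ x) && decide (v ≠ -x) <;> simp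
            have houter : ((w :: u :: ws').any fun v => decide (v ≠ x) && decide (v ≠ -x)) = false := by
              simp only [List.any_cons, hany', hfw, Bool.or_false]
            rw [if_neg hany, if_neg (by rw [houter]; exact Bool.false_ne_true)]
            have hmono := fold_ops_mono x ((u :: ws').dropLast) true (op + 1)
            simp only [List.dropLast_cons₂, List.foldl_cons, hstep, List.getLastD_cons]
            have hg : (decide (((u :: ws').dropLast.foldl (bStep x) (true, op + 1)).2 ≤ k)
                  || decide (((u :: ws').dropLast.foldl (bStep x) (true, op + 1)).2 = op + 1))
                = (decide (((u :: ws').dropLast.foldl (bStep x) (true, op + 1)).2 ≤ k)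
                  || decide (((u :: ws').dropLast.foldl (bStep x) (true, op + 1)).2 = op)) := by
              by_cases hsk : ((u :: ws').dropLast.foldl (bStep x) (true, op + 1)).2 ≤ k
              · have h1 : decide (((u :: ws').dropLast.foldl (bStep x) (true, op + 1)).2 ≤ k)
                    = true := decide_eq_true hsk
                simp [h1]
              · have h2 : decide (((u :: ws').dropLast.foldl (bStep x) (true, op + 1)).2 = op + 1)
                    = false := by simp only [decide_eq_false_iff_not]; omega
                have h3 : decide (((u :: ws').dropLast.foldl (bStep x) (true, op + 1)).2 = op)
                    = false := by simp only [decide_eq_false_iff_not]; omega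
                simp [h2, h3]
            rw [hg]

lemma possibleA_eq_okB (x k : Int) (hx : x ≠ -x) (nums : List Int) :
    possibleA nums k x = okB nums k x := by
  cases nums with
  | nil => rfl
  | cons w ws =>
    have hA := aLoop_eq_sem x k ws [] w 0
    simp only [List.length_nil, List.nil_append, List.count_nil, List.length_cons,
      decide_true, Bool.true_and] at hA
    have hB := sem_eq_b x k hx ws w false 0
    rw [if_neg Bool.false_ne_true] at hB
    simp only [possibleA, okB, List.length_cons, Nat.add_sub_cancel, List.range_eq_range']
    exact hA.trans hB

-- parity-cost recursion linking the streams to the paired-positions cost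
def costF (x : Int) : Bool → List Int → Option Int
  | acc, [] => if acc then none else some 0
  | acc, v :: rest =>
    let acc' := xor acc (decide (v = -x))
    (costF x acc' rest).map (fun c => c + if acc' then 1 else 0)

lemma costF_fold (x : Int) :
    ∀ (l : List Int) (acc : Bool) (op : Int),
      costF x acc l =
        (if (l.foldl (bStep x) (acc, op)).1 then none
         else some ((l.foldl (bStep x) (acc, op)).2 - op)) := by
  intro l
  induction l with
  | nil =>
    intro acc op
    simp only [costF, List.foldl_nil]
    cases acc <;> simp
  | cons v rest ih =>
    intro acc op
    simp only [costF, List.foldl_cons]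
    have hb : bStep x (acc, op) v
        = (xor acc (decide (v = -x)), op + if xor acc (decide (v = -x)) then 1 else 0) := rfl
    rw [hb, ih]
    cases h : (rest.foldl (bStep x) (xor acc (decide (v = -x)),
        op + if xor acc (decide (v = -x)) then 1 else 0)).1
    · simp only [if_neg Bool.false_ne_true, Option.map_some]
      congr 1
      cases hacc : xor acc (decide (v = -x)) <;> simp <;> ring
    · simp


lemma costF_pair (x : Int) :
    ∀ (l : List Int) (s : Int),
      costF x false l
          = bPairCost (((PySem.List.enumerate l s).filter (fun p => decide (p.2 = -x))).map (·.1))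
      ∧ costF x true l
          = (match ((PySem.List.enumerate l s).filter (fun p => decide (p.2 = -x))).map (·.1) with
             | [] => none
             | a :: ps => (bPairCost ps).map (fun c => c + (a - s))) := by
  intro l
  induction l with
  | nil =>
    intro s
    constructor
    · simp [costF, PySem.List.enumerate_nil, bPairCost]
    · simp [costF, PySem.List.enumerate_nil]
  | cons v rest ih =>
    intro s
    obtain ⟨ihF, ihT⟩ := ih (s + 1)
    by_cases hv : v = -x
    · have hfil : ((PySem.List.enumerate (v :: rest) s).filter
            (fun p => decide (p.2 = -x))).map (·.1)
          = s :: ((PySem.List.enumerate rest (s + 1)).filter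
            (fun p => decide (p.2 = -x))).map (·.1) := by
        simp [PySem.List.enumerate_cons, List.filter_cons, hv]
      constructor
      · show (costF x (xor false (decide (v = -x))) rest).map
            (fun c => c + if xor false (decide (v = -x)) then 1 else 0) = _
        rw [hfil]
        simp only [hv, decide_true, Bool.xor_false, Bool.false_xor, if_pos rfl, ihT]
        cases hP : ((PySem.List.enumerate rest (s + 1)).filter
            (fun p => decide (p.2 = -x))).map (·.1) with
        | nil => simp [bPairCost]
        | cons a ps =>
          show (match a :: ps with
              | [] => none
              | a :: ps => (bPairCost ps).map (fun c => c + (a - (s + 1)))).map _ = _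
          simp only [bPairCost]
          cases hB : bPairCost ps with
          | none => simp
          | some c => simp; ring
      · show (costF x (xor true (decide (v = -x))) rest).map
            (fun c => c + if xor true (decide (v = -x)) then 1 else 0) = _
        rw [hfil]
        simp only [hv, decide_true, Bool.xor_self, ihF]
        cases hB : bPairCost (((PySem.List.enumerate rest (s + 1)).filter
            (fun p => decide (p.2 = -x))).map (·.1)) with
        | none => simp
        | some c => simp
    · have hfil : ((PySem.List.enumerate (v :: rest) s).filter
            (fun p => decide (p.2 = -x))).map (·.1)
          = ((PySem.List.enumerate rest (s + 1)).filter
            (fun p => decide (p.2 = -x))).map (·.1) := by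
        simp [PySem.List.enumerate_cons, List.filter_cons, hv]
      constructor
      · show (costF x (xor false (decide (v = -x))) rest).map
            (fun c => c + if xor false (decide (v = -x)) then 1 else 0) = _
        rw [hfil]
        simp only [hv, decide_false, Bool.xor_false, ihF]
        cases hB : bPairCost (((PySem.List.enumerate rest (s + 1)).filter
            (fun p => decide (p.2 = -x))).map (·.1)) with
        | none => simp
        | some c => simp
      · show (costF x (xor true (decide (v = -x))) rest).map
            (fun c => c + if xor true (decide (v = -x)) then 1 else 0) = _
        rw [hfil]
        simp only [hv, decide_false, Bool.xor_false, ihT]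
        cases hP : ((PySem.List.enumerate rest (s + 1)).filter
            (fun p => decide (p.2 = -x))).map (·.1) with
        | nil => simp
        | cons a ps =>
          cases hB : bPairCost ps with
          | none => simp [hB]
          | some c => simp [hB]; ring


lemma bCollect_spec :
    ∀ (l : List (Int × Int)) (ones negs : List Int),
      bCollect l ones negs =
        (if l.all (fun p => decide (p.2 = 1) || decide (p.2 = -1))
         then some (ones ++ (l.filter (fun p => decide (p.2 = 1))).map (·.1),
                    negs ++ (l.filter (fun p => decide (p.2 = -1))).map (·.1))
         else none) := by
  intro l
  induction l with
  | nil => intro ones negs; simp [bCollect]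
  | cons p rest ih =>
    intro ones negs
    obtain ⟨i, v⟩ := p
    by_cases h1 : v = 1
    · simp only [bCollect, if_pos h1, ih, h1]
      by_cases hall : rest.all (fun p => decide (p.2 = 1) || decide (p.2 = -1)) = true
      · simp [hall, List.filter_cons]
      · simp only [Bool.not_eq_true] at hall
        simp [hall]
    · by_cases h2 : v = -1
      · simp only [bCollect, if_neg h1, if_pos h2, ih, h2]
        by_cases hall : rest.all (fun p => decide (p.2 = 1) || decide (p.2 = -1)) = true
        · simp [hall, List.filter_cons, h1]
        · simp only [Bool.not_eq_true] at hall
          simp [hall]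
      · simp [bCollect, h1, h2]


lemma enum_all_snd (l : List Int) :
    ∀ (s : Int),
      (PySem.List.enumerate l s).all (fun p => decide (p.2 = 1) || decide (p.2 = -1))
        = l.all (fun v => decide (v = 1) || decide (v = -1)) := by
  induction l with
  | nil => intro s; simp [PySem.List.enumerate_nil]
  | cons v rest ih =>
    intro s
    simp [PySem.List.enumerate_cons, ih]


lemma any_not_all (x : Int) (l : List Int) :
    (l.any fun v => decide (v ≠ x) && decide (v ≠ -x))
      = !(l.all fun v => decide (v = x) || decide (v = -x)) := by
  induction l with
  | nil => simp
  | cons v rest ih =>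
    simp only [List.any_cons, List.all_cons, Bool.not_and, Bool.not_or, ← ih, decide_not]


lemma costF_nonneg (x : Int) :
    ∀ (l : List Int) (acc : Bool) (c : Int), costF x acc l = some c → 0 ≤ c := by
  intro l
  induction l with
  | nil =>
    intro acc c h
    cases acc <;> simp [costF] at h <;> omega
  | cons v rest ih =>
    intro acc c h
    simp only [costF, Option.map_eq_some_iff] at h
    obtain ⟨c0, hc0, hc⟩ := h
    have := ih _ _ hc0
    subst hc
    split <;> omega


lemma costF_zero_all (x : Int) :
    ∀ (l : List Int),
      (l.all fun v => decide (v = x) || decide (v = -x)) = true →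
      costF x false l = some 0 →
      (l.all fun v => decide (v = x)) = true := by
  intro l
  induction l with
  | nil => intro _ _; rfl
  | cons v rest ih =>
    intro hall h0
    simp only [costF, Option.map_eq_some_iff] at h0
    obtain ⟨c0, hc0, hc⟩ := h0
    have hnn := costF_nonneg x rest _ _ hc0
    have hacc : xor false (decide (v = -x)) = false := by
      cases hx : xor false (decide (v = -x))
      · rfl
      · rw [hx] at hc; simp at hc; omega
    rw [hacc] at hc hc0
    simp only [if_neg Bool.false_ne_true] at hc
    have hc00 : c0 = 0 := by omega
    simp only [Bool.false_xor] at hacc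
    simp only [List.all_cons, Bool.and_eq_true] at hall ⊢
    have hvx : v = x := by
      have h := hall.1
      simp only [Bool.or_eq_true, decide_eq_true_eq] at h
      have hvne : v ≠ -x := by simpa using hacc
      tauto
    exact ⟨by simpa using hvx, ih hall.2 (hc00 ▸ hc0)⟩


lemma dropLast_concat_getLastD (w : Int) (ws : List Int) :
    (w :: ws).dropLast ++ [(w :: ws).getLastD 0] = w :: ws := by
  induction ws generalizing w with
  | nil => rfl
  | cons u t ih =>
    have h := ih u
    simp only [List.getLastD_cons] at h
    simp only [List.dropLast_cons₂, List.getLastD_cons, List.cons_append]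
    rw [h]


lemma all_or_comm (l : List Int) :
    (l.all fun v => decide (v = -1) || decide (v = (1:Int)))
      = (l.all fun v => decide (v = (1:Int)) || decide (v = -1)) := by
  induction l with
  | nil => rfl
  | cons v t ih =>
    simp only [List.all_cons, ih]
    rw [Bool.or_comm]

lemma all_weaken (x : Int) (l : List Int) (h : (l.all fun v => decide (v = x)) = true) :
    (l.all fun v => decide (v = x) || decide (v = -x)) = true := by
  simp only [List.all_eq_true] at h ⊢
  intro v hv
  simp [h v hv]

lemma costF_all_zero (x : Int) (hx : x ≠ -x) :
    ∀ l : List Int, (l.all fun v => decide (v = x)) = true → costF x false l = some 0 := by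
  intro l
  induction l with
  | nil => intro _; rfl
  | cons v t ih =>
    intro h
    simp only [List.all_cons, Bool.and_eq_true, decide_eq_true_eq] at h
    have hv : decide (v = -x) = false := by
      simp only [decide_eq_false_iff_not]
      rw [h.1]
      exact hx
    simp only [costF, hv, Bool.xor_false, Bool.false_eq_true, if_false]
    rw [ih h.2]
    simp

lemma cz_eq (x k : Int) (nums : List Int)
    (hall : (nums.all fun v => decide (v = x) || decide (v = -x)) = true)
    (hne : ¬ (k < 0 ∧ (nums.all fun v => decide (v = x)) = true)) :
    (match costF x false nums with | none => false | some c => decide (c ≤ k) || decide (c = 0))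
      = (match costF x false nums with | none => false | some c => decide (c ≤ k)) := by
  cases hc : costF x false nums with
  | none => rfl
  | some c =>
    by_cases hc0 : c = 0
    · subst hc0
      have hallx := costF_zero_all x nums hall hc
      have hk : 0 ≤ k := by
        by_contra h
        exact hne ⟨by omega, hallx⟩
      simp [hk]
    · simp [hc0]

lemma okB_norm (x k : Int) (nums : List Int) :
    okB nums k x =
      ((nums.all fun v => decide (v = x) || decide (v = -x)) &&
       (match costF x false nums with
        | none => false
        | some c => decide (c ≤ k) || decide (c = 0))) := by
  cases nums with
  | nil => simp [okB, costF]
  | cons w ws =>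
    simp only [okB]
    rw [any_not_all]
    cases hall : ((w :: ws).all fun v => decide (v = x) || decide (v = -x)) with
    | false => simp [hall]
    | true =>
      simp only [Bool.not_true, Bool.false_eq_true, if_false, Bool.true_and]
      have hsplit := dropLast_concat_getLastD w ws
      have hfold : (w :: ws).foldl (bStep x) (false, (0:Int))
          = bStep x ((w :: ws).dropLast.foldl (bStep x) (false, 0)) ((w :: ws).getLastD 0) := by
        conv_lhs => rw [← hsplit]
        rw [List.foldl_append]
        rfl
      have hcost := costF_fold x (w :: ws) false 0
      rw [hfold] at hcost
      set s := (w :: ws).dropLast.foldl (bStep x) (false, (0:Int)) with hs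
      have hbs : bStep x s ((w :: ws).getLastD 0)
          = (xor s.1 (decide ((w :: ws).getLastD 0 = -x)),
             s.2 + if xor s.1 (decide ((w :: ws).getLastD 0 = -x)) then 1 else 0) := rfl
      rw [hbs] at hcost
      cases hacc : xor s.1 (decide ((w :: ws).getLastD 0 = -x)) with
      | true =>
        rw [hacc] at hcost
        norm_num at hcost
        rw [hcost]
        simp
      | false =>
        rw [hacc] at hcost
        norm_num at hcost
        rw [hcost]
        simp


lemma alt_norm (nums : List Int) (k : Int) :
    canMakeEqual_alt nums k =
      ((nums.all fun v => decide (v = 1) || decide (v = -1)) &&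
       ((match costF 1 false nums with | none => false | some c => decide (c ≤ k)) ||
        (match costF (-1) false nums with | none => false | some c => decide (c ≤ k)))) := by
  unfold canMakeEqual_alt
  rw [bCollect_spec, enum_all_snd]
  cases hall : (nums.all fun v => decide (v = 1) || decide (v = -1)) with
  | false => simp [hall]
  | true =>
    simp only [List.nil_append, Bool.true_and]
    have h1 := (costF_pair 1 nums 0).1
    have h2 := (costF_pair (-1) nums 0).1
    simp only [neg_neg] at h2
    rw [h1, h2]
    simp


lemma main_eq (nums : List Int) (k : Int) (hnd : ¬ D_canMakeEqual nums k) :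
    canMakeEqual nums k = canMakeEqual_alt nums k := by
  unfold canMakeEqual D_canMakeEqual at *
  rw [possibleA_eq_okB 1 k (by decide) nums, possibleA_eq_okB (-1) k (by decide) nums,
      okB_norm, okB_norm, alt_norm]
  have hcomm : (nums.all fun v => decide (v = -1) || decide (v = -(-1:Int)))
      = (nums.all fun v => decide (v = (1:Int)) || decide (v = -1)) := by
    simp only [neg_neg]
    exact all_or_comm nums
  rw [hcomm]
  cases hall : (nums.all fun v => decide (v = (1:Int)) || decide (v = -1)) with
  | false => simp
  | true =>
    simp only [Bool.true_and]
    have e1 := cz_eq 1 k nums hall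
      (fun h => hnd ⟨h.1, Or.inl h.2⟩)
    have e2 := cz_eq (-1) k nums
      (by simp only [neg_neg]; rw [all_or_comm]; exact hall)
      (fun h => hnd ⟨h.1, Or.inr h.2⟩)
    rw [e1, e2]


-- ===== VERDICT (by name: the statement is the Claim_ definition above) =====
theorem canMakeEqual_spec : Claim_unchanged_canMakeEqual := by
  intro nums k _
  unfold Spec_canMakeEqual
  intro hnd
  exact main_eq nums k hnd

theorem canMakeEqual_changed : Claim_changed_canMakeEqual := by
  unfold Claim_changed_canMakeEqual; decide

theorem canMakeEqual_tight : Claim_exact_canMakeEqual := by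
  intro nums k _ hD
  obtain ⟨hk, hall⟩ := hD
  have hBfalse : canMakeEqual_alt nums k = false := by
    rw [alt_norm]
    have e1 : (match costF 1 false nums with | none => false | some c => decide (c ≤ k)) = false := by
      cases hc : costF 1 false nums with
      | none => rfl
      | some c =>
        have := costF_nonneg 1 nums false c hc
        simp only [decide_eq_false_iff_not]
        omega
    have e2 : (match costF (-1 : Int) false nums with | none => false | some c => decide (c ≤ k)) = false := by
      cases hc : costF (-1 : Int) false nums with
      | none => rfl
      | some c =>
        have := costF_nonneg (-1) nums false c hc
        simp only [decide_eq_false_iff_not]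
        omega
    rw [e1, e2]
    simp
  have hAtrue : canMakeEqual nums k = true := by
    unfold canMakeEqual
    rw [possibleA_eq_okB 1 k (by decide) nums, possibleA_eq_okB (-1) k (by decide) nums,
        okB_norm, okB_norm]
    rcases hall with h1 | h2
    · rw [costF_all_zero 1 (by decide) nums h1, all_weaken 1 nums h1]
      simp
    · rw [costF_all_zero (-1) (by decide) nums h2, all_weaken (-1) nums h2]
      simp
  rw [hAtrue, hBfalse]
  simp
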